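/- GENERATED by mk_final_copies.py from the proof of the farm's unit `start_decoder.R12d` (farm:start_decoder.R12d.1: Proof.lean) as the
   re-elaboration sweep compiled it — do not edit. -/
import Asan.CheckWalk
import Vorbis.Spec.Reader
import Vorbis.Spec.Units.start_decoder_R12d

open X86 X86.User Asan Vorbis Vorbis.Spec Vorbis.Spec.StartDecoder

set_option maxRecDepth 4000
set_option maxHeartbeats 4000000

namespace Vorbis.Spec.start_decoder_R12d

/-- The windows that segment R12d writes, `m` the record under construction and `j` the submap: the stack below the steady stack
pointer (pushed return addresses, `error`'s frame), the spill `[R + 18H, R + 1CH)`, the byte `submap_residue[j]` at `m + 21H + j`,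
and `f->error` (`error`'s footprint). -/
def wins (g : Ghost) (m j : Nat) : List Span :=
  [⟨g.R - 408, g.R⟩, ⟨g.R + 0x18, g.R + 0x1c⟩, ⟨m + j + 33, m + j + 34⟩, ⟨g.f + 140, g.f + 144⟩]

/-- What a state `w` reached from the cut point `v` of R12d over the segment's windows keeps. -/
structure Carried (u₀ : State) (g : Ghost) (pc' : Word) (i j : Nat) (A7 A7c Ai : Arena) (A : Arena × List Obj) (v w : State) :
    Prop where
  /-- the loop record at the new program counter -/
  loop : MapLoop u₀ g pc' i A7 A7c Ai A w
  /-- the record's address is the same number -/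
  emap : mapAt g w.mem i = mapAt g v.mem i
  /-- the record under construction -/
  cur : MapCur g (Since Ai A.1) w.mem i 12
  /-- `submaps` reads the same -/
  esub : Mapping.submaps w.mem (mapAt g v.mem i) = Mapping.submaps v.mem (mapAt g v.mem i)
  /-- `submap_floor[j]` reads the same -/
  efloor : Mapping.submap_floor w.mem (mapAt g v.mem i) j = Mapping.submap_floor v.mem (mapAt g v.mem i) j
  /-- `floor_count` reads the same -/
  efc : stb_vorbis.floor_count w.mem g.f = stb_vorbis.floor_count v.mem g.f
  /-- `residue_count` reads the same -/
  erc : stb_vorbis.residue_count w.mem g.f = stb_vorbis.residue_count v.mem g.f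
  /-- MP6 for the finished submaps -/
  done : ∀ s : Nat, s < j → Mapping.SubmapOK w.mem g.f (mapAt g w.mem i) s

/-- **THE CARRY OF SEGMENT R12d**: the loop record by `MapLoop.carry` (every window a `MapWin`), `Bits` by `bits_kept` (no reader
call in this segment), the record under construction by `MapCur.carry`, the finished submaps from the record's bytes below the
stored one. -/
theorem carry {u₀ : State} {g : Ghost} {pc' : Word} {i j : Nat} {A7 A7c Ai : Arena} {A : Arena × List Obj} {v w : State}
    (hb : BodyR12c u₀ g i j A7 A7c Ai A v)
    (hs : Mem.SameExcept (wins g (mapAt g v.mem i) j) v.mem w.mem) (hun : ShadowUntouched v.mem w.mem)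
    (hrip : w.rip = pc') (hrsp : w.reg .rsp = addr g.R) (hcode : CodeOK u₀ w.mem) (hinv : abiInv w)
    (hrbp : w.reg .rbp = v.reg .rbp) : Carried u₀ g pc' i j A7 A7c Ai A v w := by
  have hpt := hb.pt
  have hl := hpt.loop
  have hcur := hpt.cur
  have hm := hl.mid
  have hp : Pos g A := hl.secPt.pos
  obtain ⟨htab, hT1, hT2⟩ := hl.table
  have h1 := hl.maps.MP1
  have hlt := hcur.lt
  have p1 := hp.r_eq
  have p2 := hp.ra_lo
  have p3 := hp.ra_hi
  have p4 := hp.f_lo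
  have p5 := hp.f_hi
  have p6 := hp.f_stack
  have p7 := hp.objOut
  have p9 := hp.ar_lo
  have p10 := hp.ar_hi
  have p11 := hp.ar_stack
  have em : mapAt g v.mem i = stb_vorbis.mapping v.mem g.f + 56 * i := rfl
  have h3 := hcur.MP3
  have hjlt := hb.j_lt
  have hj16 : j < 16 := by omega
  unfold wins at hs
  -- every window is a `MapWin`
  have hws : ∀ x, x ∈ [(⟨g.R - 408, g.R⟩ : Span), ⟨g.R + 0x18, g.R + 0x1c⟩,
      ⟨mapAt g v.mem i + j + 33, mapAt g v.mem i + j + 34⟩, ⟨g.f + 140, g.f + 144⟩] →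
      MapWin g Ai A (mapAt g v.mem i) x := by
    intro x hx
    simp only [List.mem_cons, List.mem_nil_iff, or_false] at hx
    unfold MapWin
    rcases hx with rfl | rfl | rfl | rfl
    · left
      simp only []
      omega
    · right; left
      simp only []
      omega
    · right; right; right; right; right; right; right; right; right; left
      simp only []
      omega
    · right; right; right; right; right; left
      simp only []
      omega
  have hbits : Bits (g.Blk A) g.len w.mem g.f := by
    apply bits_kept hp hm.bits hs
    intro x hx
    simp only [List.mem_cons, List.mem_nil_iff, or_false] at hx
    rcases hx with rfl | rfl | rfl | rfl
    · left
      simp only []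
      omega
    · left
      simp only []
      omega
    · right; left
      simp only []
      omega
    · right; right; left
      simp only []
      omega
  have hl' : MapLoop u₀ g pc' i A7 A7c Ai A w := hl.carry hlt hs hun hws hbits hrip hrsp hcode hinv hrbp
  obtain ⟨ecount, _, emap, echn, _⟩ := hl.fields_eq hlt hs hws
  have hobj := hl.objEq hlt hs hws
  -- the record below the stored byte reads the same
  have hrec : Mem.EqOn (mapAt g v.mem i) (mapAt g v.mem i + j + 33) v.mem w.mem := by
    apply hs.eqOn
    intro x hx
    simp only [List.mem_cons, List.mem_nil_iff, or_false] at hx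
    rcases hx with rfl | rfl | rfl | rfl <;> simp only [] <;> omega
  -- the `chan` block: allocated since `Ai`, the mapping table is a block of `Ai`
  have hC : Since Ai A.1 ⟨Mapping.chan v.mem (mapAt g v.mem i), Off.sizeof.MappingChannel * nchan v.mem g.f⟩ := hcur.MP2
  have hCin := arena_inside hm.arena hC.1
  have hdis := hm.arena.old_disjoint_since hl.maps.exti (htab.mono hl.maps.ext7c) hC
  simp only [vblock] at hdis
  simp only [] at hCin
  have hchan : (Block.mk (Mapping.chan v.mem (mapAt g v.mem i)) (Off.sizeof.MappingChannel * nchan v.mem g.f)).Kept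
      v.mem w.mem := by
    apply Block.Kept.of_sameExcept hs
    · intro x hx
      simp only [List.mem_cons, List.mem_nil_iff, or_false] at hx
      rcases hx with rfl | rfl | rfl | rfl <;> simp only [] <;> omega
    · simp only []
      omega
  have hcur' : MapCur g (Since Ai A.1) w.mem i 12 :=
    hcur.carry ecount emap echn (hrec.mono (Nat.le_refl _) (by omega)) (by omega) (fun _ => hchan)
  have esub : Mapping.submaps w.mem (mapAt g v.mem i) = Mapping.submaps v.mem (mapAt g v.mem i) := by
    simp only [vacc, voff]
    exact hrec.u8 _ (by omega) (by omega) (by omega)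
  have efloor : Mapping.submap_floor w.mem (mapAt g v.mem i) j = Mapping.submap_floor v.mem (mapAt g v.mem i) j := by
    simp only [vacc, voff]
    exact hrec.u8 _ (by omega) (by omega) (by omega)
  have efc : stb_vorbis.floor_count w.mem g.f = stb_vorbis.floor_count v.mem g.f := by
    simp only [vacc, voff]
    exact hobj.i32 176 (by decide)
  have erc : stb_vorbis.residue_count w.mem g.f = stb_vorbis.residue_count v.mem g.f := by
    simp only [vacc, voff]
    exact hobj.i32 320 (by decide)
  refine ⟨hl', emap, hcur', esub, efloor, efc, erc, ?_⟩
  intro s hs'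
  rw [emap]
  have hold := hpt.done s hs'
  have ef : Mapping.submap_floor w.mem (mapAt g v.mem i) s = Mapping.submap_floor v.mem (mapAt g v.mem i) s := by
    simp only [vacc, voff]
    exact hrec.u8 _ (by omega) (by omega) (by omega)
  have er : Mapping.submap_residue w.mem (mapAt g v.mem i) s = Mapping.submap_residue v.mem (mapAt g v.mem i) s := by
    simp only [vacc, voff]
    exact hrec.u8 _ (by omega) (by omega) (by omega)
  unfold Mapping.SubmapOK at hold ⊢
  rw [ef, er, efc, erc]
  exact hold


/-- The signed value of a zero-extended byte (`movzx r12d, byte […]`) is the byte. -/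
theorem zext8_toInt (n : Nat) (h : n < 256) : (BitVec.zeroExtend 32 (BitVec.ofNat 8 n)).toInt = (n : Int) := by
  have h1 : (BitVec.zeroExtend 32 (BitVec.ofNat 8 n)).toNat = n := by
    simp only [BitVec.toNat_setWidth, BitVec.toNat_ofNat, BitVec.zeroExtend]
    omega
  rw [BitVec.toInt_eq_toNat_cond, h1]
  split <;> omega

/-- The byte stored by `mov byte […], al` after `movzx eax, byte […]` is the byte loaded. -/
theorem byte_back (n : Nat) (h : n < 256) : (BitVec.setWidth 8 (BitVec.zeroExtend 32 (BitVec.ofNat 8 n))).toNat = n := by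
  simp only [BitVec.toNat_setWidth, BitVec.toNat_ofNat, BitVec.zeroExtend]
  omega

/-- **Segment R12d of `start_decoder`** (`cut307` 0x1164c7 … 0x116541 → the head `cut310` 0x116545 with `j + 1`, or the epilogue
`cut4` 0x113b22 with eax = 0): the spill of eax to `[R + 18H]`, `submap_residue[j] = ` its low byte (store1 check at `m + 21H + j`:
`MapLoop.site_record`), the re-loaded `submap_floor[j]` (load1 check via r15) `< f->floor_count` (load4 check: OB1), the spilled byte
`< f->residue_count` (load4 check: OB1), `++j`. ONE walk over all paths; each exit carries the loop record from the cut point over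
the literal footprint `wins` (`carry`). Both tests passed: `Mapping.SubmapOK … j` from the two signed `jl` (zero-extended bytes
against the `int` counts), `R12.succ`. A failing test: `error(f, 20)` returned, a second walk over the `jmp`, `MapLoop.toERR`. -/
theorem seg_walk {Lay : Layout} (hLay : Lay.hi = 0x1000000) {μ : Microarch} (hμ : UserX.MicroOK μ) {u₀ : State}
    (hcode : HasCodeNat Lay u₀ Vorbis.L.start_decoder.entry Vorbis.Code.code_start_decoder.nat Vorbis.L.start_decoder.size)
    (hst1 : Asan.SmallCheck Lay μ Vorbis.WayInv (Vorbis.CodeOK u₀) [.rax, .rdx] 1 Vorbis.L.__asan_store1_noabort.entry)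
    (hld1 : Asan.SmallCheck Lay μ Vorbis.WayInv (Vorbis.CodeOK u₀) [.rax, .rdx] 1 Vorbis.L.__asan_load1_noabort.entry)
    (hld4 : Asan.SmallCheck Lay μ Vorbis.WayInv (Vorbis.CodeOK u₀) [.rax, .rcx, .rdx] 4 Vorbis.L.__asan_load4_noabort.entry)
    (h_error : ∀ (others : List Obj) (frames : List (Nat × FrameLayout)), Calls Lay μ Vorbis.WayInv (Vorbis.conv u₀) Vorbis.L.error.entry (Vorbis.Spec.error.spec others frames))
    {g : Ghost} {i j : Nat} {v : State} {A7 A7c Ai : Arena} {A : Arena × List Obj}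
    (hb : BodyR12c u₀ g i j A7 A7c Ai A v) :
    ReachVia Lay μ WayInv v (fun w => AtR12h u₀ g i (j + 1) w ∨ AtERR u₀ g w) := by
  have hpt := hb.pt
  have hl := hpt.loop
  have hcur := hpt.cur
  have hfr := hl.frame
  have hh := hl.hand
  have hm := hl.mid
  have hp : Pos g A := hl.secPt.pos
  have he := hfr.entry
  v_entry he
  obtain ⟨hRa, hR8⟩ := hfr.r_eq
  simp only [steady, Ghost.RA] at hRa
  simp only [depth] at he_room he_stack
  have hflo := hp.f_lo
  have hf2 := hp.f_hi
  have hf3 := hp.f_stack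
  simp only [Ghost.RA] at hf3
  have hRn : (addr g.R).toNat = g.R := toNat_addr _ (by omega)
  have hfn : (addr g.f).toNat = g.f := toNat_addr _ (by omega)
  obtain ⟨_, hT1, hT2⟩ := hl.table
  have h1 := hl.maps.MP1
  have hlt := hcur.lt
  have p10 := hp.ar_hi
  have p11 := hp.ar_stack
  have p7 := hp.objOut
  have hat : 1154368 ≤ A.1.B := hh.arenaText
  have em : mapAt g v.mem i = stb_vorbis.mapping v.mem g.f + 56 * i := rfl
  have h3 := hcur.MP3
  have hjlt := hb.j_lt
  obtain ⟨m, hmdef⟩ : ∃ m, mapAt g v.mem i = m := ⟨_, rfl⟩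
  rw [hmdef] at em h3 hjlt
  have hj16 : j < 16 := by omega
  have hmn : (addr m).toNat = m := toNat_addr _ (by omega)
  have hjn : (addr j).toNat = j := toNat_addr _ (by omega)
  have ea33 : addr m + addr j + 33 = addr (m + j + 33) := by
    rw [addr_add_addr, addr_add_lit]
  have ea17 : addr m + addr j + 17 = addr (m + j + 17) := by
    rw [addr_add_addr, addr_add_lit]
  have hn33 : (addr (m + j + 33)).toNat = m + j + 33 := toNat_addr _ (by omega)
  have hn17 : (addr (m + j + 17)).toNat = m + j + 17 := toNat_addr _ (by omega)
  have hasM : Lay.Has (addr m) 56 := by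
    apply has_addr Lay _ _ (by omega)
    · unfold Layout.lo
      omega
    · rw [hLay]
      omega
  have hasF : Lay.Has (addr g.f) 1808 := by
    apply has_addr Lay _ _ (by omega)
    · unfold Layout.lo
      omega
    · rw [hLay]
      omega
  have w_rip := hfr.rip
  have c_rsp := hfr.rsp
  have c_rbp := hl.rbp
  have c_rbx : v.reg .rbx = addr m := by
    rw [← hmdef]
    exact hpt.rbx
  have c_r13 := hpt.r13
  have c_r12 := hb.r12
  have c_r15 : v.reg .r15 = addr (m + j + 0x11) := by
    rw [← hmdef]
    exact hb.r15
  obtain ⟨x, c_rax⟩ : ∃ x, v.reg .rax = x := ⟨_, rfl⟩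
  -- the low byte of the spilled dword: what `movzx eax, byte [R + 18H]` (0x1164d5) and `movzx r12d, byte [R + 18H]` (0x116514) load
  obtain ⟨B, hBdef⟩ : ∃ B, (Word.part Width.w32 x).toNat % 256 = B := ⟨_, rfl⟩
  have hB : B < 256 := by omega
  have hspill : (v.mem.writeLE (addr g.R + 24) 4 (Word.part Width.w32 x).toNat).readLE (addr g.R + 24) 1 = B := by
    rw [Mem.readLE1_of_writeLE4]
    exact hBdef
  have w_eq : Mem.EqOn Vorbis.L.textLo Vorbis.L.textHi u₀.mem v.mem := hfr.code
  have hdf : v.flags .df = false := (show abiInv _ from hfr.inv).1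
  have hmx : v.mxcsr &&& 0x1F80 = 0x1F80 := (show abiInv _ from hfr.inv).2
  have hsse := Vorbis.sseOK_of_abiInv hfr.inv
  have herr := h_error A.2 g.frames'
  u_walk hcode [hμ.vendor, hspill, ea33, ea17] until [Vorbis.L.start_decoder.cut308, Vorbis.L.start_decoder.cut309, Vorbis.L.start_decoder.cut310] span [Vorbis.L.textLo, Vorbis.L.textHi] side (v_side)
  case check_1164d0 =>
    -- 0x1164d0: the store1 check of `submap_residue[j]` at `m + 21H + j`, inside the record
    have hun : ShadowUntouched v.mem s_1164d0.mem := by v_untouched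
    refine Vorbis.Spec.check_site hfr.shadow hun (hl.site_record hlt (j + 33) 1 (by omega) (by omega)) ?_
    rw [hn33, hmdef]
    omega
  case check_1164e2 =>
    -- 0x1164e2: the load1 check of `submap_floor[j]` at `m + 11H + j` (r15)
    have hun : ShadowUntouched v.mem s_1164e2.mem := by v_untouched
    refine Vorbis.Spec.check_site hfr.shadow hun (hl.site_record hlt (j + 17) 1 (by omega) (by omega)) ?_
    rw [hn17, hmdef]
    omega
  case check_1164f4 =>
    -- 0x1164f4: the load4 check of `f->floor_count` (OB1)
    have hun : ShadowUntouched v.mem s_1164f4.mem := by v_untouched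
    refine (hh.obj.mono (frames'_sub g A.2)).accSmall hfr.shadow hun _ 4 (by decide) (by u_omega) ?_
    simp only [Off.sizeof.stb_vorbis]
    u_omega
  case check_116521 =>
    -- 0x116521: the load4 check of `f->residue_count` (OB1)
    have hun : ShadowUntouched v.mem s_116521.mem := by v_untouched
    refine (hh.obj.mono (frames'_sub g A.2)).accSmall hfr.shadow hun _ 4 (by decide) (by u_omega) ?_
    simp only [Off.sizeof.stb_vorbis]
    u_omega
  case call_inv => v_inv
  case pre_116537 =>
    -- the precondition of `error(f, VORBIS_invalid_setup)` of line 4137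
    have hun : ShadowUntouched v.mem s_116537.mem := by v_untouched
    refine ⟨shadowPre_call hfr (by rw [w_rsp]; u_omega) hun, ?_⟩
    rw [w_rdi, hfn]
    exact hh.obj.mono (frames'_sub g A.2)
  case call_inv => v_inv
  case pre_11650a =>
    -- the precondition of `error(f, VORBIS_invalid_setup)` of line 4136
    have hun : ShadowUntouched v.mem s_11650a.mem := by v_untouched
    refine ⟨shadowPre_call hfr (by rw [w_rsp]; u_omega) hun, ?_⟩
    rw [w_rdi, hfn]
    exact hh.obj.mono (frames'_sub g A.2)
  · -- 0x116541 `add r13d, 1`: both tests passed; the head (cut310) with `j + 1`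
    have hun : ShadowUntouched v.mem s_116541.mem := by v_untouched
    have hs : Mem.SameExcept [⟨g.R - 408, g.R⟩, ⟨g.R + 0x18, g.R + 0x1c⟩, ⟨m + j + 33, m + j + 34⟩,
        ⟨g.f + 140, g.f + 144⟩] v.mem s_116541.mem := by
      u_same
    have habi : abiInv s_116541 := by v_inv
    have hc : Carried u₀ g Vorbis.L.start_decoder.cut310 i j A7 A7c Ai A v s_116541 := by
      refine carry hb ?_ hun w_rip w_rsp w_eq habi (w_kept.get .rbp rfl)
      rw [hmdef]
      exact hs
    -- r13 = j + 1
    have hr13 : s_116541.reg .r13 = addr (j + 1) := by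
      rw [w_r13]
      exact cnt32_succ j (by omega)
    -- the first test (0x116500 `jl`, signed): `submap_floor[j] < floor_count`
    have hr1 : v.mem.readLE (addr (m + j + 17)) 1 < 256 := by
      have := Mem.readLE_lt' v.mem (addr (m + j + 17)) 1
      omega
    have hr4a : v.mem.readLE (addr g.f + 176) 4 < 2 ^ 32 := by
      have := Mem.readLE_lt' v.mem (addr g.f + 176) 4
      omega
    have hr4b : v.mem.readLE (addr g.f + 320) 4 < 2 ^ 32 := by
      have := Mem.readLE_lt' v.mem (addr g.f + 320) 4
      omega
    rw [zext8_toInt _ hr1, toInt_ofNat32 _ hr4a] at hbr_116500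
    rw [zext8_toInt _ hB, toInt_ofNat32 _ hr4b] at hbr_11652d
    have e_fl : Mapping.submap_floor v.mem m j = v.mem.readLE (addr (m + j + 17)) 1 := by
      simp only [vacc, voff]
      unfold Mem.u8
      rw [show m + 17 + j = m + j + 17 by omega]
    have e_fc : stb_vorbis.floor_count v.mem g.f = sint32 (v.mem.readLE (addr g.f + 176) 4) := by
      simp only [vacc, voff]
      unfold Mem.i32 Mem.u32
      rw [← addr_add_lit]
    have e_rc : stb_vorbis.residue_count v.mem g.f = sint32 (v.mem.readLE (addr g.f + 320) 4) := by
      simp only [vacc, voff]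
      unfold Mem.i32 Mem.u32
      rw [← addr_add_lit]
    -- the byte stored at `m + 21H + j` is the low byte of the spill
    have e_res : Mapping.submap_residue s_116541.mem m j = B := by
      simp only [vacc, voff]
      unfold Mem.u8
      rw [show m + 33 + j = m + j + 33 by omega, w_mem, byte_back B hB]
      u_read
    have hsub : Mapping.SubmapOK s_116541.mem g.f (mapAt g s_116541.mem i) j := by
      unfold Mapping.SubmapOK
      rw [hc.emap, hmdef, e_res, hc.efc, hc.erc, e_fc, e_rc]
      have e := hc.efloor
      rw [hmdef] at e
      rw [e, e_fl]
      exact ⟨hbr_116500, hbr_11652d⟩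
    have hin : InR12 u₀ g Vorbis.L.start_decoder.cut310 i (j + 1) A7 A7c Ai A s_116541 := by
      refine R12.succ hc.loop ?_ hc.cur hr13 ?_ hc.done hsub
      · rw [hc.emap, w_kept.get .rbx rfl]
        exact hpt.rbx
      · rw [hc.emap, hc.esub]
        exact hb.j_lt
    exact ReachVia.done (Or.inl ⟨A7, A7c, Ai, A, hin⟩)
  · -- `error` returned into cut309 (0x11653c), line 4137: `jmp 113b22`, the epilogue with eax = 0
    v_after_call w_rsp_116537 w_mem_116537
    simp only [w_rdi_116537, hfn] at w_same
    have hs : Mem.SameExcept [⟨g.R - 408, g.R⟩, ⟨g.R + 0x18, g.R + 0x1c⟩, ⟨m + j + 33, m + j + 34⟩,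
        ⟨g.f + 140, g.f + 144⟩] v.mem s_116537r.mem := by
      u_same
    have hun : ShadowUntouched v.mem s_116537r.mem := by v_untouched
    have w_rax : s_116537r.reg .rax = 0 := w_post.1
    clear w_post
    u_walk hcode [hμ.vendor] until [Vorbis.L.start_decoder.cut4] span [Vorbis.L.textLo, Vorbis.L.textHi] side (v_side)
    -- 0x113b22 (cut4): the loop record over the whole footprint, then `MapLoop.toERR`
    have habi : abiInv s_11653c := by v_inv
    have hc : Carried u₀ g pc_ERR i j A7 A7c Ai A v s_11653c := by
      refine carry hb ?_ ?_ w_rip w_rsp w_eq habi (w_kept.get .rbp rfl)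
      · rw [hmdef, w_mem]
        exact hs
      · rw [w_mem]
        exact hun
    refine ReachVia.done (Or.inr (hc.loop.toERR ?_))
    rw [w_rax]
    rfl
  · -- `error` returned into cut308 (0x11650f), line 4136: `jmp 113b22`, the epilogue with eax = 0
    v_after_call w_rsp_11650a w_mem_11650a
    simp only [w_rdi_11650a, hfn] at w_same
    have hs : Mem.SameExcept [⟨g.R - 408, g.R⟩, ⟨g.R + 0x18, g.R + 0x1c⟩, ⟨m + j + 33, m + j + 34⟩,
        ⟨g.f + 140, g.f + 144⟩] v.mem s_11650ar.mem := by
      u_same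
    have hun : ShadowUntouched v.mem s_11650ar.mem := by v_untouched
    have w_rax : s_11650ar.reg .rax = 0 := w_post.1
    clear w_post
    u_walk hcode [hμ.vendor] until [Vorbis.L.start_decoder.cut4] span [Vorbis.L.textLo, Vorbis.L.textHi] side (v_side)
    -- 0x113b22 (cut4): the loop record over the whole footprint, then `MapLoop.toERR`
    have habi : abiInv s_11650f := by v_inv
    have hc : Carried u₀ g pc_ERR i j A7 A7c Ai A v s_11650f := by
      refine carry hb ?_ ?_ w_rip w_rsp w_eq habi (w_kept.get .rbp rfl)
      · rw [hmdef, w_mem]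
        exact hs
      · rw [w_mem]
        exact hun
    refine ReachVia.done (Or.inr (hc.loop.toERR ?_))
    rw [w_rax]
    rfl

end Vorbis.Spec.start_decoder_R12d

/-- The unit `start_decoder.R12d`: `seg_walk` at every entry state. -/
theorem Vorbis.Spec.Worked.start_decoder_R12d_ok : Vorbis.Spec.start_decoder_R12d.Statement := by
  intro Lay hLay μ hμ u₀ hcode hst1 hld1 hld4 h_error g i j v hat
  obtain ⟨A7, A7c, Ai, A, hb⟩ := hat
  exact Vorbis.Spec.start_decoder_R12d.seg_walk hLay hμ hcode hst1 hld1 hld4 h_error hb
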